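-- pv_equiv track=rewrite | github.com/xgsnmj/Co-Sight | cosight_server/sdk/common/utils.py | get_cookie_param_value
-- ===== SOURCE A (Python) =====
-- def get_cookie_param_value(cookie: str, param: str):
--     if not cookie:
--         return None
--
--     cookies = cookie.split('; ')
--     cookie_dict = {}
--
--     for cookie_item in cookies:
--         if '=' in cookie_item:
--             key, value = cookie_item.split('=', 1)  # 最多分割一次
--             cookie_dict[key] = value
--
--     return cookie_dict.get(param)
-- ===== SOURCE B (Python) =====
-- def get_cookie_param_value(cookie: str, param: str):
--     if not cookie or '=' in param:
--         # cookie keys are the text before the first '=', so a param containing '=' can never match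
--         return None
--     prefix = param + '='
--     result = None
--     for item in cookie.split('; '):
--         if item.startswith(prefix):
--             result = item[len(prefix):]
--     return result
-- ===== Notes on version B (the rewrite author's own statement) =====
-- stated objective: simpler
-- what changed: Instead of splitting every item at '=' and building a dict of all cookies to look param up, B makes one forward pass that prefix-matches each item against param+'=' (after an upfront guard: a param containing '=' can never be a cookie key) and keeps the last match's suffix as the value.
import Mathlib
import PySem

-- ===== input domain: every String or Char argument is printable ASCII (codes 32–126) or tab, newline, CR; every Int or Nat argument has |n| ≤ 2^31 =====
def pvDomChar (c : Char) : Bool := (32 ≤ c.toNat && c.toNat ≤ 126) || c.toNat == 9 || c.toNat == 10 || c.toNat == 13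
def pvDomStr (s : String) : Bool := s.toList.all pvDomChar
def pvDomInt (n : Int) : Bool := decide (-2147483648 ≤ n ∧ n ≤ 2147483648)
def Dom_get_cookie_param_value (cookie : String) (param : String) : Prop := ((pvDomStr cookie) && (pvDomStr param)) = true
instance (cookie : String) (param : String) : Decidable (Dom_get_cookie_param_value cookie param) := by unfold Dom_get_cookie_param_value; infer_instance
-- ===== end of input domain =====

-- B replaces A's build-a-dict-of-all-cookies-then-lookup by a single forward pass that prefix-matches
-- each item against `param + '='` and keeps the last match (simpler: no splitting of items, no dict).

-- ===== PORT A =====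
-- step of A's dict-building loop
def gcpvStep (d : PySem.Dict String String) (item : String) : PySem.Dict String String :=
  if PySem.Str.isIn "=" item then
    match (PySem.Str.splitMax? item "=" 1).getD [] with
    | key :: value :: _ => d.insert key value
    | _ => d
  else d

def get_cookie_param_value (cookie : String) (param : String) : Option String :=
  if cookie = "" then none
  else
    let cookies := (PySem.Str.split? cookie "; ").getD []
    let cookie_dict := cookies.foldl gcpvStep PySem.Dict.empty
    cookie_dict.get? param

-- ===== PORT B =====
-- B's loop body: a prefix-matching item overwrites the running result with its value part
def gcpvUpd (pre : String) (result : Option String) (item : String) : Option String :=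
  if PySem.Str.startswith item pre then
    some (PySem.Str.slice item (some (PySem.Str.len pre)) none)
  else result

def get_cookie_param_value_alt (cookie : String) (param : String) : Option String :=
  if cookie = "" then none
  else if PySem.Str.isIn "=" param then none  -- a cookie key never contains '=', so such a param never matches
  else ((PySem.Str.split? cookie "; ").getD []).foldl (gcpvUpd (param ++ "=")) none

-- ===== PRECONDITION & SPEC =====
def Spec_get_cookie_param_value (cookie : String) (param : String) (out : Option String) : Prop := out = get_cookie_param_value_alt cookie param
instance (cookie : String) (param : String) (out : Option String) : Decidable (Spec_get_cookie_param_value cookie param out) := by unfold Spec_get_cookie_param_value; infer_instance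

-- ===== CLAIM (what is proved, stated in full; the proofs are below) =====
def Claim_equal_get_cookie_param_value : Prop := ∀ (cookie : String) (param : String), Dom_get_cookie_param_value cookie param → Spec_get_cookie_param_value cookie param (get_cookie_param_value cookie param)

-- ===== LEMMAS AND PROOFS =====

-- splitOnMax.go with maxsplit budget 0 returns the remainder
theorem gcpv_go_zero (fuel : Nat) (l cur : List Char) (acc : List (List Char)) :
    PySem.Chars.splitOnMax.go ['='] fuel 0 l cur acc = ((cur.reverse ++ l) :: acc).reverse := by
  cases fuel <;> cases l <;> simp [PySem.Chars.splitOnMax.go]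

-- go with budget 1 on pre ++ '=' :: suf ('=' ∉ pre) splits at that '='
theorem gcpv_go_pre (pre : List Char) (hpre : '=' ∉ pre) :
    ∀ (fuel : Nat) (suf cur : List Char) (acc : List (List Char)), pre.length < fuel →
    PySem.Chars.splitOnMax.go ['='] fuel 1 (pre ++ '=' :: suf) cur acc
      = (suf :: (cur.reverse ++ pre) :: acc).reverse := by
  induction pre with
  | nil =>
    intro fuel suf cur acc hf
    cases fuel with
    | zero => omega
    | succ f =>
      simp only [List.nil_append]
      rw [show PySem.Chars.splitOnMax.go ['='] (f+1) 1 ('=' :: suf) cur acc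
            = PySem.Chars.splitOnMax.go ['='] f 0 suf [] (cur.reverse :: acc) by
            simp [PySem.Chars.splitOnMax.go, List.isPrefixOf]]
      rw [gcpv_go_zero]
      simp
  | cons c pre' ih =>
    intro fuel suf cur acc hf
    cases fuel with
    | zero => simp at hf
    | succ f =>
      have hc : c ≠ '=' := fun h => hpre (h ▸ List.mem_cons_self ..)
      rw [show PySem.Chars.splitOnMax.go ['='] (f+1) 1 ((c :: pre') ++ '=' :: suf) cur acc
            = PySem.Chars.splitOnMax.go ['='] f 1 (pre' ++ '=' :: suf) (c :: cur) acc by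
            simp [PySem.Chars.splitOnMax.go, List.isPrefixOf, Ne.symm hc]]
      rw [ih (fun h => hpre (List.mem_cons_of_mem _ h)) f suf (c :: cur) acc (by simpa using Nat.lt_of_succ_lt_succ hf)]
      simp

theorem gcpv_splitMax (pre suf : List Char) (hpre : '=' ∉ pre) :
    PySem.Chars.splitMax? (pre ++ '=' :: suf) ['='] 1 = some [pre, suf] := by
  rw [PySem.Chars.splitMax?]
  simp only [List.isEmpty_cons, if_false, Bool.false_eq_true]
  rw [PySem.Chars.splitOnMax]
  rw [if_neg (by omega)]
  rw [show (1 : Int).toNat = 1 from rfl]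
  rw [gcpv_go_pre pre hpre _ suf [] [] (by simp only [List.length_append, List.length_cons]; omega)]
  simp

-- the Str-level split of a decomposed item
theorem gcpv_str_splitMax (item key value : String)
    (hdec : item.toList = key.toList ++ '=' :: value.toList) (hk : '=' ∉ key.toList) :
    PySem.Str.splitMax? item "=" 1 = some [key, value] := by
  have h := PySem.Str.splitMax?_map item "=" 1
  rw [show ("=" : String).toList = ['='] from rfl, hdec, gcpv_splitMax _ _ hk] at h
  cases ho : PySem.Str.splitMax? item "=" 1 with
  | none => rw [ho] at h; simp at h
  | some l =>
    rw [ho] at h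
    simp only [Option.map_some, Option.some.injEq] at h
    cases l with
    | nil => simp at h
    | cons a t =>
      cases t with
      | nil => simp at h
      | cons b t' =>
        cases t' with
        | cons x y => simp at h
        | nil =>
          simp only [List.map_cons, List.map_nil, List.cons.injEq, and_true] at h
          obtain ⟨ha, hb⟩ := h
          rw [String.toList_inj.mp ha, String.toList_inj.mp hb]

-- takeWhile (· != '=') cuts exactly at the first '='
theorem gcpv_takeWhile (a b : List Char) (ha : '=' ∉ a) :
    (a ++ '=' :: b).takeWhile (· != '=') = a := by
  rw [List.takeWhile_append]
  rw [List.takeWhile_eq_self_iff.mpr (by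
    intro x hx
    simp only [bne_iff_ne, ne_eq]
    intro h; exact ha (h ▸ hx))]
  simp

-- if param has no '=', one A-step answers like one B-step on the running result
theorem gcpv_step_get (d : PySem.Dict String String) (item param : String) (hp : '=' ∉ param.toList) :
    (gcpvStep d item).get? param = gcpvUpd (param ++ "=") (d.get? param) item := by
  unfold gcpvStep gcpvUpd
  by_cases h : PySem.Str.isIn "=" item = true
  · -- '=' occurs in item: decompose at its first occurrence
    have hmem : '=' ∈ item.toList := by
      have := (PySem.Str.isIn_iff_infix "=" item).mp h
      obtain ⟨s, t, hst⟩ := this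
      rw [show ("=" : String).toList = ['='] from rfl] at hst
      rw [← hst]; simp
    set pre := item.toList.takeWhile (· != '=') with hpre_def
    have hpre : '=' ∉ pre := by
      intro hm
      have := List.mem_takeWhile_imp (p := (· != '=')) hm
      simp at this
    have hdrop : item.toList.dropWhile (· != '=') = '=' :: (item.toList.dropWhile (· != '=')).tail := by
      cases hd : item.toList.dropWhile (· != '=') with
      | nil =>
        exfalso
        have : ∀ x ∈ item.toList, (x != '=') = true := by
          have := List.takeWhile_append_dropWhile (p := (· != '=')) (l := item.toList)
          rw [hd, List.append_nil] at this
          intro x hx; rw [← this] at hx; exact List.mem_takeWhile_imp (p := (· != '=')) hx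
        simpa using this '=' hmem
      | cons c t =>
        have hc := List.head_dropWhile_not (p := (· != '=')) (l := item.toList) (by rw [hd]; simp)
        simp [hd] at hc
        simp [hc]
    have hdec : item.toList = pre ++ '=' :: (item.toList.dropWhile (· != '=')).tail := by
      conv_lhs => rw [← List.takeWhile_append_dropWhile (p := (· != '=')) (l := item.toList)]
      rw [← hpre_def]
      congr 1
    set suf := (item.toList.dropWhile (· != '=')).tail with hsuf_def
    have hsplit : PySem.Str.splitMax? item "=" 1 = some [String.ofList pre, String.ofList suf] := by
      apply gcpv_str_splitMax
      · simpa [String.toList_ofList] using hdec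
      · simpa [String.toList_ofList] using hpre
    rw [if_pos h, hsplit]
    simp only [Option.getD_some]
    rw [PySem.Dict.get?_insert]
    -- startswith item (param ++ "=") ↔ param = ofList pre
    have hsw : PySem.Str.startswith item (param ++ "=") = true ↔ param = String.ofList pre := by
      rw [PySem.Str.startswith, PySem.Chars.startswith_iff]
      constructor
      · intro hpfx
        obtain ⟨t, ht⟩ := hpfx
        rw [String.toList_append, show ("=" : String).toList = ['='] from rfl] at ht
        have : (param.toList ++ '=' :: t).takeWhile (· != '=') = param.toList := by
          simpa using gcpv_takeWhile param.toList t hp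
        rw [show param.toList ++ ['='] ++ t = param.toList ++ '=' :: t by simp] at ht
        have hpt : param.toList = pre := by
          rw [hpre_def, ← ht, this]
        apply String.toList_inj.mp
        rw [hpt]; simp [String.toList_ofList]
      · intro he
        subst he
        refine ⟨suf, ?_⟩
        rw [String.toList_append, show ("=" : String).toList = ['='] from rfl]
        rw [hdec]
        simp [String.toList_ofList]
    by_cases hmatch : PySem.Str.startswith item (param ++ "=") = true
    · rw [if_pos hmatch, if_pos (hsw.mp hmatch)]
      congr 1
      apply String.toList_inj.mp
      have hlen : PySem.Str.len (param ++ "=") = ((param.toList.length + 1 : Nat) : Int) := by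
        simp [PySem.Str.len_eq, String.toList_append]
      rw [PySem.Str.slice]
      rw [show (String.ofList suf).toList = suf by simp [String.toList_ofList]]
      rw [show (String.ofList (PySem.Chars.slice item.toList (some (PySem.Str.len (param ++ "="))) none)).toList
            = PySem.Chars.slice item.toList (some (PySem.Str.len (param ++ "="))) none by simp [String.toList_ofList]]
      rw [PySem.Chars.slice_eq_listSlice, hlen, PySem.List.slice_from_natCast, hdec]
      have : param.toList = pre := by
        have := hsw.mp hmatch
        rw [this]; simp [String.toList_ofList]
      rw [this]
      simp [List.drop_append]
    · rw [if_neg hmatch]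
      rw [if_neg (fun he => hmatch (hsw.mpr he))]
  · -- no '=' in item: A skips it, and the prefix param++"=" cannot match
    rw [if_neg h]
    have hmatch : ¬ PySem.Str.startswith item (param ++ "=") = true := by
      intro hsw
      apply h
      rw [PySem.Str.startswith, PySem.Chars.startswith_iff] at hsw
      obtain ⟨t, ht⟩ := hsw
      rw [PySem.Str.isIn_iff_infix]
      rw [show ("=" : String).toList = ['='] from rfl, ← ht, String.toList_append,
        show ("=" : String).toList = ['='] from rfl]
      exact ⟨param.toList, t, by simp⟩
    rw [if_neg hmatch]

-- the whole fold, when param has no '='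
theorem gcpv_fold (param : String) (hp : '=' ∉ param.toList) :
    ∀ (l : List String) (d : PySem.Dict String String),
    (l.foldl gcpvStep d).get? param = l.foldl (gcpvUpd (param ++ "=")) (d.get? param) := by
  intro l
  induction l with
  | nil => intro d; rfl
  | cons item rest ih =>
    intro d
    rw [List.foldl_cons, List.foldl_cons, ih, gcpv_step_get d item param hp]

-- when param contains '=', no inserted key ever equals param
theorem gcpv_fold_no_eq (param : String) (hp : '=' ∈ param.toList) :
    ∀ (l : List String) (d : PySem.Dict String String),
    (l.foldl gcpvStep d).get? param = d.get? param := by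
  intro l
  induction l with
  | nil => intro d; rfl
  | cons item rest ih =>
    intro d
    rw [List.foldl_cons, ih]
    unfold gcpvStep
    by_cases h : PySem.Str.isIn "=" item = true
    · have hmem : '=' ∈ item.toList := by
        have := (PySem.Str.isIn_iff_infix "=" item).mp h
        obtain ⟨s, t, hst⟩ := this
        rw [show ("=" : String).toList = ['='] from rfl] at hst
        rw [← hst]; simp
      set pre := item.toList.takeWhile (· != '=') with hpre_def
      have hpre : '=' ∉ pre := by
        intro hm; have := List.mem_takeWhile_imp (p := (· != '=')) hm; simp at this
      have hdrop : item.toList.dropWhile (· != '=') = '=' :: (item.toList.dropWhile (· != '=')).tail := by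
        cases hd : item.toList.dropWhile (· != '=') with
        | nil =>
          exfalso
          have : ∀ x ∈ item.toList, (x != '=') = true := by
            have := List.takeWhile_append_dropWhile (p := (· != '=')) (l := item.toList)
            rw [hd, List.append_nil] at this
            intro x hx; rw [← this] at hx; exact List.mem_takeWhile_imp (p := (· != '=')) hx
          simpa using this '=' hmem
        | cons c t =>
          have hc := List.head_dropWhile_not (p := (· != '=')) (l := item.toList) (by rw [hd]; simp)
          simp [hd] at hc
          simp [hc]
      have hdec : item.toList = pre ++ '=' :: (item.toList.dropWhile (· != '=')).tail := by
        conv_lhs => rw [← List.takeWhile_append_dropWhile (p := (· != '=')) (l := item.toList)]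
        rw [← hpre_def]; congr 1
      have hsplit := gcpv_str_splitMax item (String.ofList pre)
        (String.ofList (item.toList.dropWhile (· != '=')).tail)
        (by simpa [String.toList_ofList] using hdec) (by simpa [String.toList_ofList] using hpre)
      rw [if_pos h, hsplit]
      simp only [Option.getD_some]
      rw [PySem.Dict.get?_insert]
      rw [if_neg]
      intro he
      apply hpre
      have hpt : param.toList = pre := by rw [he, String.toList_ofList]
      rwa [hpt] at hp
    · rw [if_neg h]

-- ===== VERDICT (by name: the statement is the Claim_ definition above) =====
theorem get_cookie_param_value_spec : Claim_equal_get_cookie_param_value := by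
  intro cookie param _
  unfold Spec_get_cookie_param_value get_cookie_param_value get_cookie_param_value_alt
  by_cases hc : cookie = ""
  · simp [hc]
  · rw [if_neg hc, if_neg hc]
    by_cases hp : PySem.Str.isIn "=" param = true
    · rw [if_pos hp]
      have hmem : '=' ∈ param.toList := by
        have := (PySem.Str.isIn_iff_infix "=" param).mp hp
        obtain ⟨s, t, hst⟩ := this
        rw [show ("=" : String).toList = ['='] from rfl] at hst
        rw [← hst]; simp
      rw [gcpv_fold_no_eq param hmem]
      exact PySem.Dict.get?_empty param
    · rw [if_neg hp]
      have hnmem : '=' ∉ param.toList := by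
        intro hm
        apply hp
        rw [PySem.Str.isIn_iff_infix, show ("=" : String).toList = ['='] from rfl]
        obtain ⟨a, b, hab⟩ := List.append_of_mem hm
        exact ⟨a, b, by rw [hab]; simp⟩
      rw [gcpv_fold param hnmem]
      rw [PySem.Dict.get?_empty]
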